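-- pv_equiv track=rewrite | github.com/arkin0x/cyberspace-cli | src/cyberspace_core/cantor.py | build_hyperspace_proof
-- ===== SOURCE A (Python) =====
-- def cantor_pair(a: int, b: int) -> int:
--     s = a + b
--     return (s * (s + 1)) // 2 + b
--
-- def build_hyperspace_proof(leaves: list[int]) -> int:
--     """Build Cantor pairing tree from leaves, return root per DECK-0001 §8.
--
--     Cantor tree construction:
--     1. Pair adjacent elements using cantor_pair()
--     2. Carry forward unpaired leaf to next level
--     3. Repeat until single root remains
--
--     For hyperspace traversal, leaves = [temporal_seed, B_from, B_from+1, ..., B_to]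
--
--     Args:
--         leaves: List of integers to build tree from
--
--     Returns:
--         The root of the Cantor tree
--
--     Raises:
--         ValueError: If leaves list is empty
--     """
--     if not leaves:
--         raise ValueError("leaves list cannot be empty")
--
--     if len(leaves) == 1:
--         return leaves[0]
--
--     current_level = leaves
--
--     while len(current_level) > 1:
--         next_level = []
--         # Pair adjacent elements
--         for i in range(0, len(current_level) - 1, 2):
--             parent = cantor_pair(current_level[i], current_level[i+1])
--             next_level.append(parent)
--         # Carry forward unpaired leaf
--         if len(current_level) % 2 == 1:
--             next_level.append(current_level[-1])
--         current_level = next_level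
--
--     return current_level[0]  # Root
-- ===== SOURCE B (Python) =====
-- def cantor_pair(a: int, b: int) -> int:
--     s = a + b
--     return (s * (s + 1)) // 2 + b
--
--
-- def build_hyperspace_proof(leaves: list[int]) -> int:
--     """Cantor tree root, computed recursively: split off the largest
--     power-of-two-sized prefix (a perfect subtree) and recurse on both parts."""
--     if not leaves:
--         raise ValueError("leaves list cannot be empty")
--     n = len(leaves)
--     if n == 1:
--         return leaves[0]
--     p = 1 << ((n - 1).bit_length() - 1)  # largest power of two strictly below n
--     return cantor_pair(build_hyperspace_proof(leaves[:p]),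
--                        build_hyperspace_proof(leaves[p:]))
-- ===== Notes on version B (the rewrite author's own statement) =====
-- stated objective: alternative
-- what changed: Replaces the iterative level-by-level reduction (build each next level by pairing adjacent nodes and carrying the odd one) with a top-down recursion that splits the list at the largest power of two strictly below its length and Cantor-pairs the two recursive roots.
import Mathlib
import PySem

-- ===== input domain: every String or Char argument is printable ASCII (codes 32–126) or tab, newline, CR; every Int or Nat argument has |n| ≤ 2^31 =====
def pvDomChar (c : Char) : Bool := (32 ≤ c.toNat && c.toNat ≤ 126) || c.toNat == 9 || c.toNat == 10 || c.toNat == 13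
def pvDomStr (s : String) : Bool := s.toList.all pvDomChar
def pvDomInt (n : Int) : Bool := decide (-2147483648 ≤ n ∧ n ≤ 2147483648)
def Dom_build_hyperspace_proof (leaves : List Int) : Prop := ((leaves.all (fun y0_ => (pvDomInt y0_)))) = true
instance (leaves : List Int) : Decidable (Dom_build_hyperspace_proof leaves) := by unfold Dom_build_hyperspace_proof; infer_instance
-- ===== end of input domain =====

-- B replaces A's iterative level-by-level pairing with a top-down recursion that
-- splits at the largest power of two below the length (objective: alternative).

-- ===== PORT A =====
-- shared helper: the module's cantor_pair (identical in Source A and Source B)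
def cantorPair (a b : Int) : Int :=
  let s := a + b
  PySem.Int.floordiv (s * (s + 1)) 2 + b

-- A's inner for-loop plus the carry: pairs adjacent elements of the level;
-- the unpaired last element (odd length) remains, at the end, as A appends it.
def pairLevel : List Int → List Int
  | a :: b :: rest => cantorPair a b :: pairLevel rest
  | l => l

theorem pairLevel_length (l : List Int) : (pairLevel l).length = (l.length + 1) / 2 := by
  match l with
  | [] => simp [pairLevel]
  | [a] => simp [pairLevel]
  | a :: b :: rest => simp [pairLevel, pairLevel_length rest]; omega

-- A's while loop over current_level
def buildLoop (l : List Int) : Int :=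
  if 1 < l.length then buildLoop (pairLevel l) else l.headD 0
termination_by l.length
decreasing_by simp [pairLevel_length]; omega

def build_hyperspace_proof (leaves : List Int) : Int :=
  if leaves = [] then 0  -- Python raises ValueError here; excluded by Pre_
  else if leaves.length = 1 then leaves.headD 0
  else buildLoop leaves

-- ===== PORT B =====
-- termination facts for the split point p = 2 ^ Nat.log2 (n - 1)
theorem pw_le (n : ℕ) (h : 2 ≤ n) : 2 ^ Nat.log2 (n - 1) ≤ n - 1 := by
  rw [Nat.log2_eq_log_two]; exact Nat.pow_log_le_self 2 (by omega)

theorem pw_pos (n : ℕ) : 1 ≤ 2 ^ Nat.log2 (n - 1) := Nat.one_le_two_pow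

def build_hyperspace_proof_alt : List Int → Int
  | [] => 0  -- Source B raises ValueError here; excluded by Pre_
  | [x] => x
  | a :: b :: rest =>
    -- p = 1 << ((n-1).bit_length() - 1); bit_length(m) - 1 = Nat.log2 m for m ≥ 1
    let l := a :: b :: rest
    let p := 2 ^ Nat.log2 (l.length - 1)
    cantorPair (build_hyperspace_proof_alt (l.take p))
               (build_hyperspace_proof_alt (l.drop p))
termination_by l => l.length
decreasing_by
  · have h := pw_le (a :: b :: rest).length (by simp)
    simp at h ⊢; omega
  · have h := pw_pos (a :: b :: rest).length
    simp at h ⊢; omega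

-- ===== PRECONDITION & SPEC =====
-- Pre_ excludes exactly the empty list, on which A raises ValueError (B raises too).
def Pre_build_hyperspace_proof (leaves : List Int) : Prop := leaves ≠ []
instance (leaves : List Int) : Decidable (Pre_build_hyperspace_proof leaves) := by
  unfold Pre_build_hyperspace_proof; infer_instance

def pvWitness_build_hyperspace_proof : List Int := [1, 2, 3]

def Spec_build_hyperspace_proof (leaves : List Int) (out : Int) : Prop := out = build_hyperspace_proof_alt leaves
instance (leaves : List Int) (out : Int) : Decidable (Spec_build_hyperspace_proof leaves out) := by unfold Spec_build_hyperspace_proof; infer_instance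

-- ===== CLAIM (what is proved, stated in full; the proofs are below) =====
def Claim_equal_build_hyperspace_proof : Prop := ∀ (leaves : List Int), Dom_build_hyperspace_proof leaves → Pre_build_hyperspace_proof leaves → Spec_build_hyperspace_proof leaves (build_hyperspace_proof leaves)

-- ===== LEMMAS AND PROOFS =====

theorem pw_gt (n : ℕ) (h : 2 ≤ n) : n ≤ 2 * 2 ^ Nat.log2 (n - 1) := by
  rw [Nat.log2_eq_log_two]
  have h2 := Nat.lt_pow_succ_log_self (b := 2) (by omega) (n - 1)
  rw [pow_succ] at h2; omega

theorem pairLevel_short (l : List Int) (h : l.length ≤ 1) : pairLevel l = l := by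
  match l with
  | [] => rfl
  | [a] => rfl
  | a :: b :: rest => simp at h

theorem pairLevel_append (l₁ l₂ : List Int) (h : l₁.length % 2 = 0) :
    pairLevel (l₁ ++ l₂) = pairLevel l₁ ++ pairLevel l₂ := by
  match l₁ with
  | [] => simp [pairLevel_short]
  | [a] => simp at h
  | a :: b :: rest =>
    simp only [List.cons_append, pairLevel, List.length_cons] at h ⊢
    rw [pairLevel_append rest l₂ (by omega)]

-- one-step unfolding of B's port at length ≥ 2
theorem alt_eq_pair (l : List Int) (h : 2 ≤ l.length) :
    build_hyperspace_proof_alt l =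
      cantorPair (build_hyperspace_proof_alt (l.take (2 ^ Nat.log2 (l.length - 1))))
                 (build_hyperspace_proof_alt (l.drop (2 ^ Nat.log2 (l.length - 1)))) := by
  match l with
  | a :: b :: rest => rw [build_hyperspace_proof_alt]

theorem alt_one (x : Int) : build_hyperspace_proof_alt [x] = x := by
  rw [build_hyperspace_proof_alt.eq_def]

-- key invariant: collapsing one level of A does not change B's value
theorem alt_pairLevel : ∀ n, ∀ l : List Int, l.length = n → 2 ≤ n →
    build_hyperspace_proof_alt (pairLevel l) = build_hyperspace_proof_alt l := by
  intro n
  induction n using Nat.strong_induction_on with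
  | _ n ih =>
    intro l hlen hn
    by_cases h3 : n = 2
    · -- base: l = [a, b]
      subst h3
      obtain ⟨a, b, rfl⟩ : ∃ a b, l = [a, b] := by
        match l, hlen with
        | [a, b], _ => exact ⟨a, b, rfl⟩
      show build_hyperspace_proof_alt [cantorPair a b] = _
      rw [alt_eq_pair [a, b] (by simp), alt_one]
      have hl1 : Nat.log2 ([a, b].length - 1) = 0 := by
        norm_num [Nat.log2_eq_log_two]
      rw [hl1, pow_zero, show List.take 1 [a, b] = [a] from rfl,
        show List.drop 1 [a, b] = [b] from rfl, alt_one, alt_one]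
    · have hn3 : 3 ≤ n := by omega
      set k := Nat.log2 (n - 1) with hk
      have hk1 : 1 ≤ k := by
        rw [hk, Nat.log2_eq_log_two]
        exact Nat.log_pos (by omega) (by omega)
      set p := 2 ^ k with hp
      have hple : p ≤ n - 1 := pw_le n (by omega)
      have hpge : n ≤ 2 * p := pw_gt n (by omega)
      have hp2 : 2 ≤ p := by
        calc 2 = 2 ^ 1 := rfl
        _ ≤ 2 ^ k := Nat.pow_le_pow_right (by omega) hk1
      have hpeven : p % 2 = 0 := by
        obtain ⟨k', hkk⟩ : ∃ k', k = k' + 1 := ⟨k - 1, by omega⟩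
        rw [hp, hkk, pow_succ, Nat.mul_mod]
        simp
      -- split l at p
      have hsplit : l = l.take p ++ l.drop p := (List.take_append_drop p l).symm
      have hlt : (l.take p).length = p := by simp [hlen]; omega
      have hld : (l.drop p).length = n - p := by simp [hlen]
      have hpl : pairLevel l = pairLevel (l.take p) ++ pairLevel (l.drop p) := by
        conv_lhs => rw [hsplit]
        exact pairLevel_append _ _ (by omega)
      have hlpt : (pairLevel (l.take p)).length = p / 2 := by
        rw [pairLevel_length, hlt]; omega
      have hm : (pairLevel l).length = (n + 1) / 2 := by rw [pairLevel_length, hlen]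
      have hm2 : 2 ≤ (pairLevel l).length := by omega
      -- the split point of the collapsed level is p / 2
      have hhalf : 2 ^ Nat.log2 ((pairLevel l).length - 1) = p / 2 := by
        rw [hm, Nat.log2_eq_log_two]
        obtain ⟨k', hk'⟩ : ∃ k', k = k' + 1 := ⟨k - 1, by omega⟩
        have hpk' : p = 2 ^ k' * 2 := by rw [hp, hk', pow_succ]
        have : Nat.log 2 ((n + 1) / 2 - 1) = k' := by
          apply Nat.log_eq_of_pow_le_of_lt_pow
          · omega
          · rw [← hk']
            have := pw_gt n (by omega)
            omega
        rw [this]; omega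
      rw [alt_eq_pair (pairLevel l) hm2, hhalf, hpl,
          List.take_append_of_le_length (by omega), List.take_of_length_le (by omega),
          List.drop_append_of_le_length (by omega), List.drop_of_length_le (by omega)]
      simp only [List.nil_append]
      rw [alt_eq_pair l (by omega), hlen,  ← hk, ← hp]
      have hleft := ih p (by omega) (l.take p) hlt hp2
      rw [hleft]
      by_cases hd1 : n - p = 1
      · rw [pairLevel_short (l.drop p) (by omega)]
      · rw [ih (n - p) (by omega) (l.drop p) hld (by omega)]

theorem buildLoop_eq_alt : ∀ n, ∀ l : List Int, l.length = n → 1 ≤ n →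
    buildLoop l = build_hyperspace_proof_alt l := by
  intro n
  induction n using Nat.strong_induction_on with
  | _ n ih =>
    intro l hlen hn
    rw [buildLoop]
    by_cases h : 1 < l.length
    · rw [if_pos h]
      rw [ih ((l.length + 1) / 2) (by omega) (pairLevel l) (pairLevel_length l) (by omega)]
      exact alt_pairLevel n l hlen (by omega)
    · rw [if_neg h]
      have hlen1 : l.length = 1 := by omega
      obtain ⟨x, rfl⟩ : ∃ x, l = [x] := by
        match l, hlen1 with
        | [x], _ => exact ⟨x, rfl⟩
      rw [alt_one]
      rfl

-- ===== VERDICT (by name: the statement is the Claim_ definition above) =====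
theorem build_hyperspace_proof_spec : Claim_equal_build_hyperspace_proof := by
  intro leaves _ hpre
  unfold Spec_build_hyperspace_proof build_hyperspace_proof
  rw [if_neg hpre]
  by_cases h1 : leaves.length = 1
  · rw [if_pos h1]
    obtain ⟨x, rfl⟩ : ∃ x, leaves = [x] := by
      match leaves, h1 with
      | [x], _ => exact ⟨x, rfl⟩
    rw [alt_one]
    rfl
  · rw [if_neg h1]
    have : 1 ≤ leaves.length := by
      cases leaves with
      | nil => exact absurd rfl hpre
      | cons a t => simp
    exact buildLoop_eq_alt leaves.length leaves rfl this
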